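-- pv_equiv track=rewrite | github.com/pypi-data/pypi-mirror-402 | packages/autopypath/autopypath-0.9.0.tar.gz/autopypath-0.9.0/src/autopypath/_validate.py | is_windows_reserved
-- ===== SOURCE A (Python) =====
-- def is_windows_reserved(name: str) -> bool:
--     """Check if a given name is a reserved name on Windows.
--
--     :param str name: The file or directory name to check.
--     :return bool: True if the name is a reserved name on Windows, False otherwise.
--     """
--     reserved = {
--         'CON',
--         'PRN',
--         'AUX',
--         'NUL',
--         *(f'COM{i}' for i in range(1, 10)),
--         *(f'LPT{i}' for i in range(1, 10)),
--     }
--     # Windows ignores case and extension for reserved names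
--     base = name.split('.')[0].upper()
--     return base in reserved
-- ===== SOURCE B (Python) =====
-- def is_windows_reserved(name: str) -> bool:
--     """Check if a given name is a reserved name on Windows.
--
--     :param str name: The file or directory name to check.
--     :return bool: True if the name is a reserved name on Windows, False otherwise.
--     """
--     # Windows ignores case and extension for reserved names
--     base = name.split('.')[0].upper()
--     if base in ('CON', 'PRN', 'AUX', 'NUL'):
--         return True
--     # COM1..COM9 / LPT1..LPT9: exactly four chars, known prefix, digit 1-9
--     return len(base) == 4 and base[:3] in ('COM', 'LPT') and '1' <= base[3] <= '9'
-- ===== Notes on version B (the rewrite author's own statement) =====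
-- stated objective: simpler
-- what changed: B drops A's materialized 22-element reserved-name set and decides membership structurally on the normalized base: direct check for CON/PRN/AUX/NUL, else length==4 with prefix COM/LPT and a final digit in 1..9.
import Mathlib
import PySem

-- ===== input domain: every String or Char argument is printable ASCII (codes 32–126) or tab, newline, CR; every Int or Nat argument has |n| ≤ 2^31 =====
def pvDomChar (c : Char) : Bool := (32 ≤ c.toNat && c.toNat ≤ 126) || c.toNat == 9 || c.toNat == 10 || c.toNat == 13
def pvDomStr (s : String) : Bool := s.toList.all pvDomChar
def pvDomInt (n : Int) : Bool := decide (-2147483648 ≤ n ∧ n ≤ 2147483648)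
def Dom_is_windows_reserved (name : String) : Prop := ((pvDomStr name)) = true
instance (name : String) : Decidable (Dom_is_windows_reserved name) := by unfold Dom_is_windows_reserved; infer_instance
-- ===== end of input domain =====

-- B replaces A's materialized 22-element reserved-name set with a structural check
-- (CON/PRN/AUX/NUL, or length-4 COM/LPT plus a digit 1..9) on the normalized base: simpler, no table.


-- ===== PORT A =====
-- the set literal {'CON','PRN','AUX','NUL', *(f'COM{i}' …), *(f'LPT{i}' …)}
def pvReservedSet : PySem.Set String :=
  PySem.Set.ofList (["CON", "PRN", "AUX", "NUL"]
    ++ (PySem.List.pyRange 1 10 1).map (fun i => "COM" ++ PySem.Int.toStr i)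
    ++ (PySem.List.pyRange 1 10 1).map (fun i => "LPT" ++ PySem.Int.toStr i))

def is_windows_reserved (name : String) : Bool :=
  -- base = name.split('.')[0].upper()
  match PySem.Str.split? name "." with
  | none => false        -- unreachable: the separator "." is non-empty
  | some parts =>
    match PySem.List.pyGet? parts 0 with
    | none => false      -- unreachable: str.split never returns an empty list
    | some first => PySem.Set.contains pvReservedSet (PySem.Str.upper first)

-- ===== PORT B =====
-- structural membership test on the normalized base (Source B after computing base)
def pvStructCheck (base : String) : Bool :=
  if base = "CON" || base = "PRN" || base = "AUX" || base = "NUL" then true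
  else
    (PySem.Str.len base == 4)
    && (PySem.Str.slice base none (some 3) = "COM" || PySem.Str.slice base none (some 3) = "LPT")
    && (match PySem.Str.pyGet? base 3 with   -- base[3]; in range whenever the length test holds
        | none => false
        | some d => decide ('1' ≤ d) && decide (d ≤ '9'))

def is_windows_reserved_alt (name : String) : Bool :=
  match PySem.Str.split? name "." with
  | none => false        -- unreachable: the separator "." is non-empty
  | some parts =>
    match PySem.List.pyGet? parts 0 with
    | none => false      -- unreachable: str.split never returns an empty list
    | some first => pvStructCheck (PySem.Str.upper first)

-- ===== PRECONDITION & SPEC =====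
def Spec_is_windows_reserved (name : String) (out : Bool) : Prop := out = is_windows_reserved_alt name
instance (name : String) (out : Bool) : Decidable (Spec_is_windows_reserved name out) := by unfold Spec_is_windows_reserved; infer_instance

-- ===== CLAIM (what is proved, stated in full; the proofs are below) =====
def Claim_equal_is_windows_reserved : Prop := ∀ (name : String), Dom_is_windows_reserved name → Spec_is_windows_reserved name (is_windows_reserved name)

-- ===== LEMMAS AND PROOFS =====

lemma pvStr_eq_iff (s t : String) : s = t ↔ s.toList = t.toList := String.toList_inj.symm

lemma pvDigit_iff (d : Char) : ('1' ≤ d ∧ d ≤ '9') ↔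
    (d = '1' ∨ d = '2' ∨ d = '3' ∨ d = '4' ∨ d = '5' ∨ d = '6' ∨ d = '7' ∨ d = '8' ∨ d = '9') := by
  have c1 : ('1':Char).val.toNat = 49 := rfl
  have c2 : ('2':Char).val.toNat = 50 := rfl
  have c3 : ('3':Char).val.toNat = 51 := rfl
  have c4 : ('4':Char).val.toNat = 52 := rfl
  have c5 : ('5':Char).val.toNat = 53 := rfl
  have c6 : ('6':Char).val.toNat = 54 := rfl
  have c7 : ('7':Char).val.toNat = 55 := rfl
  have c8 : ('8':Char).val.toNat = 56 := rfl
  have c9 : ('9':Char).val.toNat = 57 := rfl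
  constructor
  · rintro ⟨h1, h2⟩
    rw [Char.le_def] at h1 h2
    simp only [Char.ext_iff, UInt32.le_iff_toNat_le, UInt32.ext_iff, c1, c2, c3, c4, c5, c6, c7, c8, c9] at *
    omega
  · rintro (rfl|rfl|rfl|rfl|rfl|rfl|rfl|rfl|rfl) <;> decide

lemma pvReservedSet_eq : pvReservedSet =
    ["CON","PRN","AUX","NUL","COM1","COM2","COM3","COM4","COM5","COM6","COM7","COM8","COM9",
     "LPT1","LPT2","LPT3","LPT4","LPT5","LPT6","LPT7","LPT8","LPT9"] := by decide

-- the heart of the equivalence: table lookup = structural test, for every string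
lemma pvCore (b : String) : PySem.Set.contains pvReservedSet b = pvStructCheck b := by
  rw [pvReservedSet_eq, Bool.eq_iff_iff]
  unfold pvStructCheck
  rw [show (PySem.Str.slice b none (some 3)) = String.ofList (b.toList.take 3) by
        apply String.toList_inj.mp
        simp [PySem.Str.toList_slice, PySem.List.slice_to b.toList (by norm_num : (0:Int) ≤ 3)]]
  simp only [PySem.Set.contains, pvStr_eq_iff, Bool.or_eq_true, decide_eq_true_eq,
    PySem.Str.len_eq, PySem.Str.pyGet?_eq, PySem.Chars.pyGet?_eq_listPyGet?,
    Bool.if_true_left, Bool.decide_or, Bool.and_eq_true, beq_iff_eq, List.elem_eq_mem,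
    List.mem_cons, List.not_mem_nil, or_false, String.toList_ofList,
    show ("CON":String).toList = ['C','O','N'] from rfl,
    show ("PRN":String).toList = ['P','R','N'] from rfl,
    show ("AUX":String).toList = ['A','U','X'] from rfl,
    show ("NUL":String).toList = ['N','U','L'] from rfl,
    show ("COM":String).toList = ['C','O','M'] from rfl,
    show ("LPT":String).toList = ['L','P','T'] from rfl,
    show ("COM1":String).toList = ['C','O','M','1'] from rfl,
    show ("COM2":String).toList = ['C','O','M','2'] from rfl,
    show ("COM3":String).toList = ['C','O','M','3'] from rfl,
    show ("COM4":String).toList = ['C','O','M','4'] from rfl,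
    show ("COM5":String).toList = ['C','O','M','5'] from rfl,
    show ("COM6":String).toList = ['C','O','M','6'] from rfl,
    show ("COM7":String).toList = ['C','O','M','7'] from rfl,
    show ("COM8":String).toList = ['C','O','M','8'] from rfl,
    show ("COM9":String).toList = ['C','O','M','9'] from rfl,
    show ("LPT1":String).toList = ['L','P','T','1'] from rfl,
    show ("LPT2":String).toList = ['L','P','T','2'] from rfl,
    show ("LPT3":String).toList = ['L','P','T','3'] from rfl,
    show ("LPT4":String).toList = ['L','P','T','4'] from rfl,
    show ("LPT5":String).toList = ['L','P','T','5'] from rfl,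
    show ("LPT6":String).toList = ['L','P','T','6'] from rfl,
    show ("LPT7":String).toList = ['L','P','T','7'] from rfl,
    show ("LPT8":String).toList = ['L','P','T','8'] from rfl,
    show ("LPT9":String).toList = ['L','P','T','9'] from rfl]
  generalize b.toList = l
  rcases l with _ | ⟨a, _ | ⟨b2, _ | ⟨c, _ | ⟨d, _ | ⟨e, rest⟩⟩⟩⟩⟩
  · simp
  · simp
  · simp
  · simp [List.cons.injEq]; tauto
  · rw [show PySem.List.pyGet? [a, b2, c, d] 3 = some d from rfl]
    simp only [List.cons.injEq, and_true, List.take_succ_cons, List.take_zero,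
      Bool.and_eq_true, decide_eq_true_eq, List.length_cons, List.length_nil]
    norm_num [pvDigit_iff]
    simp only [or_and_right, and_or_left, or_assoc, and_assoc]
    constructor <;> rintro (⟨rfl,rfl,rfl,rfl⟩|⟨rfl,rfl,rfl,rfl⟩|⟨rfl,rfl,rfl,rfl⟩|⟨rfl,rfl,rfl,rfl⟩|⟨rfl,rfl,rfl,rfl⟩|⟨rfl,rfl,rfl,rfl⟩|⟨rfl,rfl,rfl,rfl⟩|⟨rfl,rfl,rfl,rfl⟩|⟨rfl,rfl,rfl,rfl⟩|⟨rfl,rfl,rfl,rfl⟩|⟨rfl,rfl,rfl,rfl⟩|⟨rfl,rfl,rfl,rfl⟩|⟨rfl,rfl,rfl,rfl⟩|⟨rfl,rfl,rfl,rfl⟩|⟨rfl,rfl,rfl,rfl⟩|⟨rfl,rfl,rfl,rfl⟩|⟨rfl,rfl,rfl,rfl⟩|⟨rfl,rfl,rfl,rfl⟩) <;> simp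
  · simp
    intro h _
    omega

theorem is_windows_reserved_spec_aux (name : String) :
    is_windows_reserved name = is_windows_reserved_alt name := by
  unfold is_windows_reserved is_windows_reserved_alt
  cases PySem.Str.split? name "." with
  | none => rfl
  | some parts =>
    dsimp only
    cases PySem.List.pyGet? parts 0 with
    | none => rfl
    | some first => exact pvCore _

-- ===== VERDICT (by name: the statement is the Claim_ definition above) =====
theorem is_windows_reserved_spec : Claim_equal_is_windows_reserved := by
  intro name _
  exact is_windows_reserved_spec_aux name
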